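-- pv_equiv track=rewrite | github.com/maragon97475/Plan-Produccion | automate_pp.py | asignar_calidades
-- ===== SOURCE A (Python) =====
-- def asignar_calidades(claves, valores, valor_comparativo):
--
--     valores_finales = []
--     for valor_comp in valor_comparativo:
--         cont = 0
--         for clave, valor in zip(claves, valores):
--             if valor_comp <= clave:
--                 cont += 1
--                 valores_finales.append(valor)
--                 break
--         if cont == 0:
--             valores_finales.append('D')
--     return valores_finales
-- ===== SOURCE B (Python) =====
-- def asignar_calidades(claves, valores, valor_comparativo):
--     # Keep only "record" thresholds: pairs whose clave exceeds every earlier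
--     # clave.  A query's first matching pair is always one of these records,
--     # and record claves are strictly increasing, so binary search applies.
--     records = []
--     best = None
--     for clave, valor in zip(claves, valores):
--         if best is None or clave > best:
--             records.append((clave, valor))
--             best = clave
--     n = len(records)
--     out = []
--     for q in valor_comparativo:
--         lo, hi = 0, n
--         while lo < hi:
--             mid = (lo + hi) // 2
--             if records[mid][0] < q:
--                 lo = mid + 1
--             else:
--                 hi = mid
--         out.append(records[lo][1] if lo < n else 'D')
--     return out
-- ===== Notes on version B (the rewrite author's own statement) =====
-- stated objective: faster
-- what changed: B precomputes the strictly-increasing prefix-maxima records of (clave, valor) once and answers each query by binary search over them, instead of rescanning all pairs linearly per query.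
import Mathlib
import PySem

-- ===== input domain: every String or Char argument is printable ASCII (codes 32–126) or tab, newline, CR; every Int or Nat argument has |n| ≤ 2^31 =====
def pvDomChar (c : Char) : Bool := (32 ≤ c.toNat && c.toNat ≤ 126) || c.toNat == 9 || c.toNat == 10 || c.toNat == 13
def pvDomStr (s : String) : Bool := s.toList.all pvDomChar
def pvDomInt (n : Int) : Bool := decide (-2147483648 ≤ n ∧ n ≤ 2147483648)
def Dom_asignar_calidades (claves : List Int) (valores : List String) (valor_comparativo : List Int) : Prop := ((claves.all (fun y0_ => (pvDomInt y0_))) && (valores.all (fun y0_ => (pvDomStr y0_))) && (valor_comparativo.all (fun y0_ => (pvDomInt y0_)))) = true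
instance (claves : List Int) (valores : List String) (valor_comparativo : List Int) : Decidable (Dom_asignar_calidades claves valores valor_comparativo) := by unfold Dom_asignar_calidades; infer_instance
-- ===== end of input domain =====

-- B replaces A's per-query linear rescan of all (clave, valor) pairs by a one-time
-- prefix-maxima record list plus a binary search per query (objective: faster).

-- ===== PORT A =====
-- inner 'for clave, valor in zip(...)' loop with break / cont==0 → 'D'
def findA (q : Int) : List (Int × String) → String
  | [] => "D"
  | (c, v) :: rest => if q ≤ c then v else findA q rest

def asignar_calidades (claves : List Int) (valores : List String) (valor_comparativo : List Int) : List String :=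
  valor_comparativo.map (fun q => findA q (claves.zip valores))

-- ===== PORT B =====
-- the records loop of Source B: keep pairs whose clave beats every earlier clave
def buildRecords : List (Int × String) → Option Int → List (Int × String)
  | [], _ => []
  | (c, v) :: rest, none => (c, v) :: buildRecords rest (some c)
  | (c, v) :: rest, some b =>
      if b < c then (c, v) :: buildRecords rest (some c) else buildRecords rest (some b)

-- the hand-written bisect_left while-loop of Source B
def bisectLeft (recs : List (Int × String)) (q : Int) (lo hi : Nat) : Nat :=
  if _h : lo < hi then
    let mid := (lo + hi) / 2
    if (recs.getD mid (0, "")).1 < q then bisectLeft recs q (mid + 1) hi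
    else bisectLeft recs q lo mid
  else lo
termination_by hi - lo
decreasing_by all_goals omega

def asignar_calidades_alt (claves : List Int) (valores : List String) (valor_comparativo : List Int) : List String :=
  let recs := buildRecords (claves.zip valores) none
  valor_comparativo.map (fun q =>
    let r := bisectLeft recs q 0 recs.length
    if r < recs.length then (recs.getD r (0, "")).2 else "D")

-- ===== PRECONDITION & SPEC =====
def Spec_asignar_calidades (claves : List Int) (valores : List String) (valor_comparativo : List Int) (out : List String) : Prop := out = asignar_calidades_alt claves valores valor_comparativo
instance (claves : List Int) (valores : List String) (valor_comparativo : List Int) (out : List String) : Decidable (Spec_asignar_calidades claves valores valor_comparativo out) := by unfold Spec_asignar_calidades; infer_instance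

-- ===== CLAIM (what is proved, stated in full; the proofs are below) =====
def Claim_equal_asignar_calidades : Prop := ∀ (claves : List Int) (valores : List String) (valor_comparativo : List Int), Dom_asignar_calidades claves valores valor_comparativo → Spec_asignar_calidades claves valores valor_comparativo (asignar_calidades claves valores valor_comparativo)

-- ===== LEMMAS AND PROOFS =====

-- every record built with lower bound b has key > b
lemma build_mem_lt : ∀ (pairs : List (Int × String)) (b : Int) (p : Int × String),
    p ∈ buildRecords pairs (some b) → b < p.1 := by
  intro pairs
  induction pairs with
  | nil => intro b p h; simp [buildRecords] at h
  | cons hd rest ih =>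
      intro b p h
      obtain ⟨c, v⟩ := hd
      simp only [buildRecords] at h
      by_cases hb : b < c
      · simp [hb] at h
        rcases h with h | h
        · subst h; exact hb
        · exact lt_trans hb (ih c p h)
      · simp [hb] at h
        exact ih b p h

-- record keys are strictly increasing
lemma build_pairwise : ∀ (pairs : List (Int × String)) (b : Option Int),
    (buildRecords pairs b).Pairwise (fun x y => x.1 < y.1) := by
  intro pairs
  induction pairs with
  | nil => intro b; simp [buildRecords]
  | cons hd rest ih =>
      intro b
      obtain ⟨c, v⟩ := hd
      cases b with
      | none =>
          simp only [buildRecords]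
          exact List.Pairwise.cons (fun p hp => build_mem_lt rest c p hp) (ih (some c))
      | some bb =>
          simp only [buildRecords]
          by_cases hb : bb < c
          · simp only [hb, if_true]
            exact List.Pairwise.cons (fun p hp => build_mem_lt rest c p hp) (ih (some c))
          · simp only [hb, if_false]
            exact ih (some bb)

-- A's linear first-match scan is unchanged by dropping non-record pairs
lemma findA_build : ∀ (pairs : List (Int × String)) (b : Option Int) (q : Int),
    (∀ bb, b = some bb → bb < q) → findA q pairs = findA q (buildRecords pairs b) := by
  intro pairs
  induction pairs with
  | nil => intro b q _; cases b <;> simp [buildRecords]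
  | cons hd rest ih =>
      intro b q hb
      obtain ⟨c, v⟩ := hd
      cases b with
      | none =>
          simp only [buildRecords, findA]
          by_cases hq : q ≤ c
          · simp [hq]
          · simp only [hq, if_false]
            exact ih (some c) q (by intro bb hbb; cases hbb; omega)
      | some bb =>
          have hbbq : bb < q := hb bb rfl
          simp only [buildRecords]
          by_cases hc : bb < c
          · simp only [hc, if_true, findA]
            by_cases hq : q ≤ c
            · simp [hq]
            · simp only [hq, if_false]
              exact ih (some c) q (by intro x hx; cases hx; omega)
          · simp only [hc, if_false]
            have hq : ¬ q ≤ c := by omega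
            simp only [findA, hq, if_false]
            exact ih (some bb) q (by intro x hx; cases hx; omega)

-- characterise findA by the first index whose key is ≥ q
lemma findA_eq_idx : ∀ (recs : List (Int × String)) (q : Int) (r : Nat),
    r ≤ recs.length →
    (∀ i, i < r → (recs.getD i (0, "")).1 < q) →
    (r < recs.length → q ≤ (recs.getD r (0, "")).1) →
    findA q recs = if r < recs.length then (recs.getD r (0, "")).2 else "D" := by
  intro recs
  induction recs with
  | nil =>
      intro q r hr _ _
      have : r = 0 := Nat.le_zero.mp hr
      subst this
      simp [findA]
  | cons hd rest ih =>
      intro q r hr h1 h2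
      obtain ⟨c, v⟩ := hd
      by_cases hq : q ≤ c
      · have hr0 : r = 0 := by
          by_contra h
          have := h1 0 (by omega)
          simp at this
          omega
        subst hr0
        simp [findA, hq]
      · have hcq : c < q := by omega
        cases r with
        | zero =>
            have := h2 (by simp)
            simp at this
            omega
        | succ r' =>
            simp only [findA, hq, if_false]
            have := ih q r' (by simpa using hr)
              (fun i hi => by simpa using h1 (i + 1) (by omega))
              (fun h => by simpa using h2 (by simpa using h))
            simpa using this

-- the binary-search loop lands on the first index whose key is ≥ q
lemma bisect_spec : ∀ (recs : List (Int × String)) (q : Int) (lo hi : Nat),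
    (∀ i j, i ≤ j → j < recs.length →
      (recs.getD i (0, "")).1 ≤ (recs.getD j (0, "")).1) →
    lo ≤ hi → hi ≤ recs.length →
    (∀ i, i < lo → (recs.getD i (0, "")).1 < q) →
    (∀ i, hi ≤ i → i < recs.length → q ≤ (recs.getD i (0, "")).1) →
    bisectLeft recs q lo hi ≤ recs.length ∧
      (∀ i, i < bisectLeft recs q lo hi → (recs.getD i (0, "")).1 < q) ∧
      (bisectLeft recs q lo hi < recs.length → q ≤ (recs.getD (bisectLeft recs q lo hi) (0, "")).1) := by
  intro recs q lo hi
  induction lo, hi using bisectLeft.induct recs q with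
  | case1 lo hi hlt mid hmidlt ih =>
      intro hsort hle hhi h1 h2
      rw [bisectLeft]
      simp only [hlt, dif_pos]
      have hmid : mid = (lo + hi) / 2 := rfl
      rw [show ((lo + hi) / 2) = mid from rfl]
      simp only [hmidlt, if_true]
      apply ih hsort (by omega) hhi
      · intro i hi'
        rcases Nat.lt_or_ge i lo with h | h
        · exact h1 i h
        · calc (recs.getD i (0, "")).1 ≤ (recs.getD mid (0, "")).1 :=
                hsort i mid (by omega) (by omega)
            _ < q := hmidlt
      · exact h2
  | case2 lo hi hlt mid hmidlt ih =>
      intro hsort hle hhi h1 h2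
      rw [bisectLeft]
      simp only [hlt, dif_pos]
      rw [show ((lo + hi) / 2) = mid from rfl]
      simp only [hmidlt, if_false]
      apply ih hsort (by omega) (by omega) h1
      intro i hi' hilen
      calc q ≤ (recs.getD mid (0, "")).1 := by omega
        _ ≤ (recs.getD i (0, "")).1 := hsort mid i hi' hilen
  | case3 lo hi hlt =>
      intro hsort hle hhi h1 h2
      rw [bisectLeft]
      simp only [hlt, dif_neg, not_false_iff]
      refine ⟨by omega, h1, fun h => h2 lo (by omega) h⟩

-- pairwise-< on keys gives the index-monotonicity bisect_spec needs
lemma pairwise_sorted {recs : List (Int × String)}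
    (h : recs.Pairwise (fun x y => x.1 < y.1)) :
    ∀ i j, i ≤ j → j < recs.length →
      (recs.getD i (0, "")).1 ≤ (recs.getD j (0, "")).1 := by
  intro i j hij hj
  rcases Nat.eq_or_lt_of_le hij with h' | h'
  · subst h'; exact le_refl _
  · have hi : i < recs.length := by omega
    rw [List.getD_eq_getElem recs (0, "") hi, List.getD_eq_getElem recs (0, "") hj]
    exact le_of_lt (List.pairwise_iff_getElem.mp h i j hi hj h')

-- per-query agreement of the two algorithms
lemma per_query (pairs : List (Int × String)) (q : Int) :
    findA q pairs =
      (let recs := buildRecords pairs none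
       let r := bisectLeft recs q 0 recs.length
       if r < recs.length then (recs.getD r (0, "")).2 else "D") := by
  set recs := buildRecords pairs none with hrecs
  have hsort := pairwise_sorted (build_pairwise pairs none)
  have hspec := bisect_spec recs q 0 recs.length hsort (Nat.zero_le _) (le_refl _)
    (fun i hi => absurd hi (Nat.not_lt_zero i))
    (fun i hi hilen => absurd hilen (by omega))
  obtain ⟨hle, h1, h2⟩ := hspec
  calc findA q pairs = findA q recs := findA_build pairs none q (by intro bb h; cases h)
    _ = _ := findA_eq_idx recs q (bisectLeft recs q 0 recs.length) hle h1 h2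

-- ===== VERDICT (by name: the statement is the Claim_ definition above) =====
theorem asignar_calidades_spec : Claim_equal_asignar_calidades := by
  intro claves valores vc _dom
  unfold Spec_asignar_calidades asignar_calidades asignar_calidades_alt
  exact List.map_congr_left (fun q _ => per_query (claves.zip valores) q)
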